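-- pv_equiv track=rewrite | github.com/theskinnycoder/nsc | 8_des_algorithm.py | CryptAnalysis
-- ===== SOURCE A (Python) =====
-- from itertools import product
--
-- FIXED_IP = [2, 6, 3, 1, 4, 8, 5, 7]
--
-- FIXED_IP_INVERSE = [4, 1, 3, 5, 7, 2, 8, 6]
--
-- FIXED_EP = [4, 1, 2, 3, 2, 3, 4, 1]
--
-- FIXED_P10 = [3, 5, 2, 7, 4, 10, 1, 9, 8, 6] #10 bit permutation
--
-- FIXED_P8 = [6, 3, 7, 4, 8, 5, 10, 9] #8 bit permutation [3,10]
--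
-- FIXED_P4 = [2, 4, 3, 1] #4 bit permutation [1,4]
--
-- S0 = [[1, 0, 3, 2], [3, 2, 1, 0], [0, 2, 1, 3], [3, 1, 3, 2]]
--
-- S1 = [[0, 1, 2, 3], [2, 0, 1, 3], [3, 0, 1, 0], [2, 1, 0, 3]]
--
-- def permutate(original, fixed_key):
--     new = ''
--     for i in fixed_key:
--         new += original[i - 1]
--     return new
--
-- def left_half(bits):
--     return bits[:len(bits) // 2]
--
-- def right_half(bits):
--     return bits[len(bits) // 2:]
--
-- def shift(bits):
--     rotated_left_half = left_half(bits)[1:] + left_half(bits)[0]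
--     rotated_right_half = right_half(bits)[1:] + right_half(bits)[0]
--     return rotated_left_half + rotated_right_half
--
-- def key1(KEY):
--     return permutate(shift(permutate(KEY, FIXED_P10)), FIXED_P8)
--
-- def key2(KEY):
--     return permutate(shift(shift(shift(permutate(KEY, FIXED_P10)))), FIXED_P8)
--
-- def xor(bits, key):
--     new = ''
--     for bit, key_bit in zip(bits, key):
--         new += str(((int(bit) + int(key_bit)) % 2))
--     return new
--
-- def lookup_in_sbox(bits, sbox):
--     row = int(bits[0] + bits[3], 2)
--     col = int(bits[1] + bits[2], 2)
--     return '{0:02b}'.format(sbox[row][col])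
--
-- def f_k(bits, key):
--     L = left_half(bits)
--     R = right_half(bits)
--     bits = permutate(R, FIXED_EP)
--     bits = xor(bits, key)
--     bits = lookup_in_sbox(left_half(bits), S0) + lookup_in_sbox(right_half(bits), S1)
--     bits = permutate(bits, FIXED_P4)
--     return xor(bits, L)
--
-- def decrypt(cipher_text, KEY):
--     bits = permutate(cipher_text, FIXED_IP)
--     temp = f_k(bits, key2(KEY))
--     bits = right_half(bits) + temp
--     bits = f_k(bits, key1(KEY))
--     return (permutate(bits + temp, FIXED_IP_INVERSE))
--
-- def message_to_bitArray(message):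
--     bitArray = []
--     for x in message:
--         bitArray.append((format(ord(x), 'b').zfill(8)))
--     return bitArray
--
-- def bitArray_to_message(bitArray):
--     message = ""
--     for x in bitArray:
--         message += chr(int(x, 2))
--     return message
--
-- def decryptText(message, KEY):
--     bitArray = message_to_bitArray(message)
--     bitArrayCipher = []
--     for x in bitArray:
--         bitArrayCipher.append(decrypt(x, KEY))
--     return bitArray_to_message(bitArrayCipher)
--
-- def CryptAnalysis(plainText, cipherText):
--     all_possible_keys = ["".join(seq) for seq in product("01", repeat=10)]
--     result_keys = []
--     for key in all_possible_keys:
--         print (key)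
--         if decryptText(cipherText, key) == plainText:
--             result_keys.append(key)
--     return result_keys
-- ===== SOURCE B (Python) =====
-- FIXED_IP = [2, 6, 3, 1, 4, 8, 5, 7]
-- FIXED_IP_INVERSE = [4, 1, 3, 5, 7, 2, 8, 6]
-- FIXED_EP = [4, 1, 2, 3, 2, 3, 4, 1]
-- FIXED_P10 = [3, 5, 2, 7, 4, 10, 1, 9, 8, 6]
-- FIXED_P8 = [6, 3, 7, 4, 8, 5, 10, 9]
-- FIXED_P4 = [2, 4, 3, 1]
-- S0 = [[1, 0, 3, 2], [3, 2, 1, 0], [0, 2, 1, 3], [3, 1, 3, 2]]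
-- S1 = [[0, 1, 2, 3], [2, 0, 1, 3], [3, 0, 1, 0], [2, 1, 0, 3]]
--
--
-- def _perm(bits, positions):
--     return ''.join(bits[i - 1] for i in positions)
--
--
-- def _rot1(half):
--     return half[1:] + half[:1]
--
--
-- def _xor(a, b):
--     return ''.join('1' if x != y else '0' for x, y in zip(a, b))
--
--
-- def _sbox(b, sbox):
--     r = (b[0] == '1') * 2 + (b[3] == '1')
--     c = (b[1] == '1') * 2 + (b[2] == '1')
--     return ('00', '01', '10', '11')[sbox[r][c]]
--
--
-- def _fk(bits, key):
--     L, R = bits[:4], bits[4:]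
--     x = _xor(_perm(R, FIXED_EP), key)
--     s = _sbox(x[:4], S0) + _sbox(x[4:], S1)
--     return _xor(_perm(s, FIXED_P4), L)
--
--
-- def _decrypt_char(c, key):
--     p = _perm(key, FIXED_P10)
--     l1, r1 = _rot1(p[:5]), _rot1(p[5:])
--     k1 = _perm(l1 + r1, FIXED_P8)
--     k2 = _perm(_rot1(_rot1(l1)) + _rot1(_rot1(r1)), FIXED_P8)
--     bits = _perm(format(ord(c), '08b'), FIXED_IP)
--     t = _fk(bits, k2)
--     return chr(int(_perm(_fk(bits[4:] + t, k1) + t, FIXED_IP_INVERSE), 2))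
--
--
-- def CryptAnalysis(plainText, cipherText):
--     # Candidate sieve: instead of fully decrypting the ciphertext under each of
--     # the 1024 keys (A's outer loop over keys), iterate over the distinct
--     # (plain char, cipher char) constraints and filter the surviving candidate
--     # keys by each single-character decryption, stopping when none survive.
--     if len(plainText) != len(cipherText):
--         return []
--     constraints = list(dict.fromkeys(zip(plainText, cipherText)))
--     candidates = [format(k, '010b') for k in range(1024)]
--     for p, c in constraints:
--         candidates = [k for k in candidates if _decrypt_char(c, k) == p]
--         if not candidates:
--             break
--     return candidates
-- ===== Notes on version B (the rewrite author's own statement) =====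
-- stated objective: faster
-- what changed: B inverts the search: instead of A's outer loop over all 1024 keys each fully decrypting the whole ciphertext (re-deriving the round keys per character), B iterates over the distinct (plaintext,ciphertext) character constraints and progressively filters a shrinking candidate-key list by one single-character decryption per constraint, breaking as soon as no candidate survives.
import Mathlib
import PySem

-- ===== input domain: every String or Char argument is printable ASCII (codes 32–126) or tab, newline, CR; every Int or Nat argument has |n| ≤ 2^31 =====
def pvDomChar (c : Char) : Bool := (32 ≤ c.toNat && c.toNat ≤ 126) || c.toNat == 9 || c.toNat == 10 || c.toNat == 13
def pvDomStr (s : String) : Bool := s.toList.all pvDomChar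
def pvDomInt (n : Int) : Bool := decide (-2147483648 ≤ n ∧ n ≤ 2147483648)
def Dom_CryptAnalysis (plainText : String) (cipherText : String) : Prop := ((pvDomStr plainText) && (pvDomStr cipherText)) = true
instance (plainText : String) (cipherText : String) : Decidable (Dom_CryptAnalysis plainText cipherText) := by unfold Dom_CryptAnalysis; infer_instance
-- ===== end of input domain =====

-- B inverts the search: A loops over all 1024 keys, fully decrypting the ciphertext under each;
-- B loops over the distinct (plaintext,ciphertext) character constraints, filtering a shrinking
-- candidate-key list with one single-character decryption per constraint and stopping early when
-- no candidate survives. A's debug `print` side effect is not reproduced (return value only).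

-- shared module constants (identical literals in both Pythons)
def pvIP : List Nat := [2, 6, 3, 1, 4, 8, 5, 7]
def pvIPINV : List Nat := [4, 1, 3, 5, 7, 2, 8, 6]
def pvEP : List Nat := [4, 1, 2, 3, 2, 3, 4, 1]
def pvP10 : List Nat := [3, 5, 2, 7, 4, 10, 1, 9, 8, 6]
def pvP8 : List Nat := [6, 3, 7, 4, 8, 5, 10, 9]
def pvP4 : List Nat := [2, 4, 3, 1]
def pvS0 : List (List Nat) := [[1, 0, 3, 2], [3, 2, 1, 0], [0, 2, 1, 3], [3, 1, 3, 2]]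
def pvS1 : List (List Nat) := [[0, 1, 2, 3], [2, 0, 1, 3], [3, 0, 1, 0], [2, 1, 0, 3]]

-- int(c) for a single binary digit char; exact on '0'/'1' (the only chars reaching it from CryptAnalysis)
def pvBit (c : Char) : Nat := if c = '1' then 1 else 0
-- int(s, 2); exact on binary-digit strings (the only strings reaching it from CryptAnalysis)
def pvBinVal (l : List Char) : Nat := l.foldl (fun a c => 2 * a + pvBit c) 0

-- ===== PORT A =====
-- strings are carried as List Char; original[i-1] via getD (indices are always in range here)
def permA (orig : List Char) (ps : List Nat) : List Char :=
  ps.foldl (fun acc i => acc ++ [orig.getD (i - 1) '0']) []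

def leftA (bs : List Char) : List Char := bs.take (bs.length / 2)
def rightA (bs : List Char) : List Char := bs.drop (bs.length / 2)

def shiftA (bs : List Char) : List Char :=
  ((leftA bs).drop 1 ++ (leftA bs).take 1) ++ ((rightA bs).drop 1 ++ (rightA bs).take 1)

def key1A (K : List Char) : List Char := permA (shiftA (permA K pvP10)) pvP8
def key2A (K : List Char) : List Char := permA (shiftA (shiftA (shiftA (permA K pvP10)))) pvP8

-- str((int(bit)+int(key_bit)) % 2), looped over zip
def xorA (bs ks : List Char) : List Char :=
  (bs.zip ks).foldl (fun acc p => acc ++ [if (pvBit p.1 + pvBit p.2) % 2 = 1 then '1' else '0']) []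

-- '{0:02b}'.format v, exact for v < 4 (S-box entries)
def bin2A (v : Nat) : List Char :=
  [if v / 2 % 2 = 1 then '1' else '0', if v % 2 = 1 then '1' else '0']

def sboxA (bs : List Char) (sbox : List (List Nat)) : List Char :=
  bin2A ((sbox.getD (pvBinVal [bs.getD 0 '0', bs.getD 3 '0']) []).getD
           (pvBinVal [bs.getD 1 '0', bs.getD 2 '0']) 0)

def fkA (bs key : List Char) : List Char :=
  let L := leftA bs
  let R := rightA bs
  let b1 := permA R pvEP
  let b2 := xorA b1 key
  let b3 := sboxA (leftA b2) pvS0 ++ sboxA (rightA b2) pvS1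
  let b4 := permA b3 pvP4
  xorA b4 L

def decryptA (ct K : List Char) : List Char :=
  let bits := permA ct pvIP
  let temp := fkA bits (key2A K)
  let bits2 := rightA bits ++ temp
  let bits3 := fkA bits2 (key1A K)
  permA (bits3 ++ temp) pvIPINV

-- format(n, 'b') without the n = 0 special case
def binRawA : Nat → List Char
  | 0 => []
  | (n + 1) => binRawA ((n + 1) / 2) ++ [if (n + 1) % 2 = 1 then '1' else '0']

-- format(ord x, 'b').zfill(8)
def zfillA (w : Nat) (l : List Char) : List Char := List.replicate (w - l.length) '0' ++ l
def toBitsA (c : Char) : List Char := zfillA 8 (if c.toNat = 0 then ['0'] else binRawA c.toNat)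

-- chr(int(x, 2))
def fromBitsA (l : List Char) : Char := Char.ofNat (pvBinVal l)

def decryptTextA (msg : List Char) (K : List Char) : List Char :=
  let bitArray := msg.foldl (fun acc x => acc ++ [toBitsA x]) []
  let bitArrayCipher := bitArray.foldl (fun acc x => acc ++ [decryptA x K]) []
  bitArrayCipher.foldl (fun acc x => acc ++ [fromBitsA x]) []

-- ["".join(seq) for seq in product("01", repeat=n)]
def prodA : Nat → List (List Char)
  | 0 => [[]]
  | (n + 1) => (prodA n).flatMap (fun x => [x ++ ['0'], x ++ ['1']])

def CryptAnalysis (plainText : String) (cipherText : String) : List String :=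
  (prodA 10).foldl
    (fun acc key =>
      if decryptTextA cipherText.toList key = plainText.toList then acc ++ [String.mk key]
      else acc) []

-- ===== PORT B =====
def permB (orig : List Char) (ps : List Nat) : List Char :=
  ps.map (fun i => orig.getD (i - 1) '0')

def rot1B (h : List Char) : List Char := h.drop 1 ++ h.take 1

def xorB (a b : List Char) : List Char :=
  (a.zip b).map (fun q => if q.1 ≠ q.2 then '1' else '0')

def sboxB (b : List Char) (sbox : List (List Nat)) : List Char :=
  let r := (if b.getD 0 '0' = '1' then 2 else 0) + (if b.getD 3 '0' = '1' then 1 else 0)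
  let c := (if b.getD 1 '0' = '1' then 2 else 0) + (if b.getD 2 '0' = '1' then 1 else 0)
  [['0', '0'], ['0', '1'], ['1', '0'], ['1', '1']].getD ((sbox.getD r []).getD c 0) []

def fkB (bits key : List Char) : List Char :=
  let L := bits.take 4
  let R := bits.drop 4
  let x := xorB (permB R pvEP) key
  xorB (permB (sboxB (x.take 4) pvS0 ++ sboxB (x.drop 4) pvS1) pvP4) L

-- format(k, '0{w}b') for k < 2^w
def binW : Nat → Nat → List Char
  | 0, _ => []
  | (w + 1), k => binW w (k / 2) ++ [if k % 2 = 1 then '1' else '0']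

def decCharB (c : Char) (key : List Char) : Char :=
  let p := permB key pvP10
  let l1 := rot1B (p.take 5)
  let r1 := rot1B (p.drop 5)
  let k1 := permB (l1 ++ r1) pvP8
  let k2 := permB (rot1B (rot1B l1) ++ rot1B (rot1B r1)) pvP8
  let bits := permB (binW 8 c.toNat) pvIP
  let t := fkB bits k2
  Char.ofNat (pvBinVal (permB (fkB (bits.drop 4 ++ t) k1 ++ t) pvIPINV))

-- the sieve loop: filter the candidates by each constraint, break when none survive
def sieveB : List (Char × Char) → List (List Char) → List (List Char)
  | [], cands => cands
  | (p, c) :: rest, cands =>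
      let cands' := cands.filter (fun key => decCharB c key = p)
      if cands' = [] then cands' else sieveB rest cands'

def CryptAnalysis_alt (plainText : String) (cipherText : String) : List String :=
  if plainText.toList.length ≠ cipherText.toList.length then []
  else
    let constraints := PySem.List.dedup (plainText.toList.zip cipherText.toList)
    let candidates := (List.range 1024).map (fun k => binW 10 k)
    (sieveB constraints candidates).map String.mk

-- ===== PRECONDITION & SPEC =====
def Spec_CryptAnalysis (plainText : String) (cipherText : String) (out : List String) : Prop := out = CryptAnalysis_alt plainText cipherText
instance (plainText : String) (cipherText : String) (out : List String) : Decidable (Spec_CryptAnalysis plainText cipherText out) := by unfold Spec_CryptAnalysis; infer_instance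

-- ===== CLAIM (what is proved, stated in full; the proofs are below) =====
def Claim_equal_CryptAnalysis : Prop := ∀ (plainText : String) (cipherText : String), Dom_CryptAnalysis plainText cipherText → Spec_CryptAnalysis plainText cipherText (CryptAnalysis plainText cipherText)

-- ===== LEMMAS AND PROOFS =====

def IsBin (l : List Char) : Prop := ∀ c ∈ l, c = '0' ∨ c = '1'

theorem getD_bin {l : List Char} (h : IsBin l) (i : Nat) : l.getD i '0' = '0' ∨ l.getD i '0' = '1' := by
  by_cases hi : i < l.length
  · rw [List.getD_eq_getElem l '0' hi]; exact h _ (List.getElem_mem hi)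
  · rw [List.getD_eq_default l '0' (by omega)]; left; rfl

theorem permAB (o : List Char) (ps : List Nat) : permA o ps = permB o ps := by
  rw [permA, PySem.List.foldl_append_singleton_eq_map, List.nil_append]; rfl

theorem permB_len (o : List Char) (ps : List Nat) : (permB o ps).length = ps.length := by
  simp [permB]

theorem permB_bin {o : List Char} (h : IsBin o) (ps : List Nat) : IsBin (permB o ps) := by
  intro c hc
  simp only [permB, List.mem_map] at hc
  obtain ⟨i, _, rfl⟩ := hc
  exact getD_bin h _

theorem xorB_bin (a b : List Char) : IsBin (xorB a b) := by
  intro c hc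
  simp only [xorB, List.mem_map] at hc
  obtain ⟨q, _, rfl⟩ := hc
  by_cases hq : q.1 ≠ q.2 <;> simp [hq]

theorem xorB_len (a b : List Char) : (xorB a b).length = min a.length b.length := by
  simp [xorB]

theorem xorAB {a b : List Char} (ha : IsBin a) (hb : IsBin b) : xorA a b = xorB a b := by
  unfold xorA xorB
  rw [PySem.List.foldl_append_singleton_eq_map, List.nil_append]
  refine List.map_congr_left (fun q hq => ?_)
  obtain ⟨h1, h2⟩ := List.of_mem_zip hq
  rcases ha _ h1 with hx | hx <;> rcases hb _ h2 with hy | hy <;>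
    rw [hx, hy] <;> decide

theorem sboxAB {bs : List Char} (h : IsBin bs) (sbox : List (List Nat))
    (hs : sbox = pvS0 ∨ sbox = pvS1) : sboxA bs sbox = sboxB bs sbox := by
  rcases hs with rfl | rfl <;>
    rcases getD_bin h 0 with h0 | h0 <;> rcases getD_bin h 1 with h1 | h1 <;>
    rcases getD_bin h 2 with h2 | h2 <;> rcases getD_bin h 3 with h3 | h3 <;>
    simp only [sboxA, sboxB, h0, h1, h2, h3] <;> decide

theorem take_bin {l : List Char} (h : IsBin l) (n : Nat) : IsBin (l.take n) :=
  fun c hc => h c (List.mem_of_mem_take hc)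

theorem drop_bin {l : List Char} (h : IsBin l) (n : Nat) : IsBin (l.drop n) :=
  fun c hc => h c (List.mem_of_mem_drop hc)

theorem append_bin {a b : List Char} (ha : IsBin a) (hb : IsBin b) : IsBin (a ++ b) := by
  intro c hc
  rcases List.mem_append.mp hc with h | h
  · exact ha c h
  · exact hb c h

theorem bin2A_bin (v : Nat) : IsBin (bin2A v) := by
  intro c hc
  simp only [bin2A, List.mem_cons, List.not_mem_nil, or_false] at hc
  rcases hc with rfl | rfl <;> split_ifs <;> simp

theorem sboxB_bin' {bs : List Char} (h : IsBin bs) (sbox : List (List Nat))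
    (hs : sbox = pvS0 ∨ sbox = pvS1) : IsBin (sboxB bs sbox) := by
  rw [← sboxAB h sbox hs]
  simp only [sboxA]
  exact bin2A_bin _

theorem fkB_bin (bits key : List Char) : IsBin (fkB bits key) := by
  simp only [fkB]; exact xorB_bin _ _

theorem fkAB {bits key : List Char} (hb : IsBin bits) (hk : IsBin key)
    (hlb : bits.length = 8) (hlk : key.length = 8) : fkA bits key = fkB bits key := by
  have hL : leftA bits = bits.take 4 := by simp [leftA, hlb]
  have hR : rightA bits = bits.drop 4 := by simp [rightA, hlb]
  simp only [fkA, fkB, hL, hR, permAB]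
  have hb1 : IsBin (permB (bits.drop 4) pvEP) := permB_bin (drop_bin hb 4) _
  rw [xorAB hb1 hk]
  have hx : IsBin (xorB (permB (bits.drop 4) pvEP) key) := xorB_bin _ _
  have hxl : (xorB (permB (bits.drop 4) pvEP) key).length = 8 := by
    rw [xorB_len, permB_len, hlk]; rfl
  have hlx : leftA (xorB (permB (bits.drop 4) pvEP) key) = (xorB (permB (bits.drop 4) pvEP) key).take 4 := by
    simp [leftA, hxl]
  have hrx : rightA (xorB (permB (bits.drop 4) pvEP) key) = (xorB (permB (bits.drop 4) pvEP) key).drop 4 := by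
    simp [rightA, hxl]
  rw [hlx, hrx, sboxAB (take_bin hx 4) pvS0 (Or.inl rfl), sboxAB (drop_bin hx 4) pvS1 (Or.inr rfl)]
  exact xorAB (permB_bin (append_bin (sboxB_bin' (take_bin hx 4) _ (Or.inl rfl)) (sboxB_bin' (drop_bin hx 4) _ (Or.inr rfl))) _) (take_bin hb 4)

theorem fkB_len {bits key : List Char} (hlb : bits.length = 8) : (fkB bits key).length = 4 := by
  simp only [fkB]
  rw [xorB_len, permB_len, List.length_take, hlb]
  rfl

theorem rot1B_len (h : List Char) : (rot1B h).length = h.length := by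
  simp [rot1B]; omega

theorem rot1B_bin {h : List Char} (hb : IsBin h) : IsBin (rot1B h) :=
  append_bin (drop_bin hb 1) (take_bin hb 1)

theorem shiftA_eq {h : List Char} (hh : h.length = 10) :
    shiftA h = rot1B (h.take 5) ++ rot1B (h.drop 5) := by
  simp [shiftA, leftA, rightA, rot1B, hh]

theorem keysAB {K : List Char} :
    key1A K = permB (rot1B ((permB K pvP10).take 5) ++ rot1B ((permB K pvP10).drop 5)) pvP8 ∧
    key2A K = permB (rot1B (rot1B (rot1B ((permB K pvP10).take 5))) ++
                     rot1B (rot1B (rot1B ((permB K pvP10).drop 5)))) pvP8 := by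
  have hp : (permB K pvP10).length = 10 := by rw [permB_len]; rfl
  have hs1 : shiftA (permB K pvP10) =
      rot1B ((permB K pvP10).take 5) ++ rot1B ((permB K pvP10).drop 5) := shiftA_eq hp
  have hls1 : (rot1B ((permB K pvP10).take 5)).length = 5 := by
    simp [rot1B_len, hp]
  have hls1' : (rot1B ((permB K pvP10).drop 5)).length = 5 := by
    simp [rot1B_len, hp]
  constructor
  · simp only [key1A, permAB, hs1]
  · have step : ∀ a b : List Char, a.length = 5 → b.length = 5 →
        shiftA (a ++ b) = rot1B a ++ rot1B b := by
      intro a b ha hb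
      rw [shiftA_eq (by simp [ha, hb]), List.take_left' ha, List.drop_left' ha]
    simp only [key2A, permAB, hs1]
    rw [step _ _ hls1 hls1', step _ _ (by rw [rot1B_len, hls1]) (by rw [rot1B_len, hls1'])]

theorem binW_zero (w : Nat) : binW w 0 = List.replicate w '0' := by
  induction w with
  | zero => rfl
  | succ n ih => rw [binW, ih, List.replicate_succ']; rfl

theorem binW_bin (w k : Nat) : IsBin (binW w k) := by
  induction w generalizing k with
  | zero => intro c hc; simp [binW] at hc
  | succ n ih =>
    rw [binW]
    exact append_bin (ih _) (by intro c hc; simp at hc; subst hc; split_ifs <;> simp)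

theorem binRawA_len {w n : Nat} (h : n < 2 ^ w) : (binRawA n).length ≤ w := by
  induction w generalizing n with
  | zero =>
    interval_cases n
    simp [binRawA]
  | succ m ih =>
    match n with
    | 0 => simp [binRawA]
    | (k + 1) =>
      rw [binRawA, List.length_append]
      have hd : (k + 1) / 2 < 2 ^ m := by
        rw [Nat.div_lt_iff_lt_mul (by norm_num)]
        calc k + 1 < 2 ^ (m + 1) := h
          _ = 2 ^ m * 2 := by ring
      have := ih hd
      simp only [List.length_cons, List.length_nil]
      omega

theorem zfill_binRaw {w n : Nat} (h : n < 2 ^ w) : zfillA w (binRawA n) = binW w n := by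
  induction w generalizing n with
  | zero =>
    interval_cases n
    simp [zfillA, binRawA, binW]
  | succ m ih =>
    match n with
    | 0 => rw [binRawA, binW, binW_zero, zfillA]; simp [List.replicate_succ']
    | (k + 1) =>
      have hd : (k + 1) / 2 < 2 ^ m := by
        rw [Nat.div_lt_iff_lt_mul (by norm_num)]
        calc k + 1 < 2 ^ (m + 1) := h
          _ = 2 ^ m * 2 := by ring
      have hlen := binRawA_len hd
      rw [binRawA, binW, ← ih hd]
      simp only [zfillA, List.length_append, List.length_cons, List.length_nil]
      rw [show m + 1 - ((binRawA ((k + 1) / 2)).length + (0 + 1)) = m - (binRawA ((k + 1) / 2)).length by omega]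
      simp

theorem toBits_eq {c : Char} (hc : c.toNat < 256) : toBitsA c = binW 8 c.toNat := by
  unfold toBitsA
  by_cases h0 : c.toNat = 0
  · rw [h0, binW_zero]
    decide
  · rw [if_neg h0]
    exact zfill_binRaw (by exact_mod_cast hc)

theorem toBitsA_bin (c : Char) : IsBin (toBitsA c) := by
  unfold toBitsA
  refine append_bin (fun x hx => ?_) ?_
  · left; exact List.eq_of_mem_replicate hx
  · split_ifs
    · intro x hx
      simp only [List.mem_cons, List.not_mem_nil, or_false] at hx
      subst hx; left; rfl
    · intro x hx
      have : ∀ n, IsBin (binRawA n) := by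
        intro n
        induction n using Nat.strong_induction_on with
        | _ n ih =>
          match n with
          | 0 => intro x hx; simp [binRawA] at hx
          | (k + 1) =>
            rw [binRawA]
            exact append_bin (ih _ (by omega))
              (by intro y hy; simp at hy; subst hy; split_ifs <;> simp)
      exact this _ x hx

theorem decCharAB {K : List Char} (hK : IsBin K) {c : Char} (hc : c.toNat < 256) :
    fromBitsA (decryptA (toBitsA c) K) = decCharB c K := by
  obtain ⟨hkey1, hkey2⟩ := @keysAB K
  have hpb : IsBin (permB K pvP10) := permB_bin hK _
  have hk1b : IsBin (permB (rot1B ((permB K pvP10).take 5) ++ rot1B ((permB K pvP10).drop 5)) pvP8) :=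
    permB_bin (append_bin (rot1B_bin (take_bin hpb 5)) (rot1B_bin (drop_bin hpb 5))) _
  have hk2b : IsBin (permB (rot1B (rot1B (rot1B ((permB K pvP10).take 5))) ++
      rot1B (rot1B (rot1B ((permB K pvP10).drop 5)))) pvP8) :=
    permB_bin (append_bin (rot1B_bin (rot1B_bin (rot1B_bin (take_bin hpb 5))))
      (rot1B_bin (rot1B_bin (rot1B_bin (drop_bin hpb 5))))) _
  have hk1l : (permB (rot1B ((permB K pvP10).take 5) ++ rot1B ((permB K pvP10).drop 5)) pvP8).length = 8 := by
    rw [permB_len]; rfl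
  have hk2l : (permB (rot1B (rot1B (rot1B ((permB K pvP10).take 5))) ++
      rot1B (rot1B (rot1B ((permB K pvP10).drop 5)))) pvP8).length = 8 := by
    rw [permB_len]; rfl
  have hbitsb : IsBin (permB (toBitsA c) pvIP) := permB_bin (toBitsA_bin c) _
  have hbitsl : (permB (toBitsA c) pvIP).length = 8 := by rw [permB_len]; rfl
  have htb : IsBin (fkB (permB (toBitsA c) pvIP) _) := fkB_bin (permB (toBitsA c) pvIP)
    (permB (rot1B (rot1B (rot1B ((permB K pvP10).take 5))) ++
      rot1B (rot1B (rot1B ((permB K pvP10).drop 5)))) pvP8)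
  have htl : (fkB (permB (toBitsA c) pvIP) (permB (rot1B (rot1B (rot1B ((permB K pvP10).take 5))) ++
      rot1B (rot1B (rot1B ((permB K pvP10).drop 5)))) pvP8)).length = 4 := fkB_len hbitsl
  have hR : rightA (permB (toBitsA c) pvIP) = (permB (toBitsA c) pvIP).drop 4 := by
    simp [rightA, hbitsl]
  simp only [decryptA, fromBitsA, decCharB, permAB, hkey1, hkey2, ← toBits_eq hc]
  rw [fkAB hbitsb hk2b hbitsl hk2l, hR,
    fkAB (append_bin (drop_bin hbitsb 4) htb) hk1b (by simp [htl, hbitsl]) hk1l]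

theorem prodA_eq (n : Nat) : prodA n = (List.range (2 ^ n)).map (binW n) := by
  induction n with
  | zero => rfl
  | succ m ih =>
    have range_double : ∀ k : Nat, List.range (2 * k) =
        (List.range k).flatMap (fun i => [2 * i, 2 * i + 1]) := by
      intro k
      induction k with
      | zero => rfl
      | succ j ihj =>
        rw [show 2 * (j + 1) = (2 * j + 1) + 1 by ring, List.range_succ, List.range_succ,
          ihj, List.range_succ, List.flatMap_append]
        simp
    rw [prodA, ih, show (2:Nat) ^ (m + 1) = 2 * 2 ^ m by ring, range_double,
      List.flatMap_map, List.map_flatMap]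
    refine List.flatMap_congr (fun i _ => ?_)
    simp only [List.map_cons, List.map_nil]
    rw [binW, binW, Nat.mul_div_cancel_left i (by norm_num),
      show (2 * i + 1) / 2 = i by omega, Nat.mul_mod_right,
      show (2 * i + 1) % 2 = 1 by omega]
    simp

theorem map_eq_iff_zip (g : Char → Char) :
    ∀ (ptl ctl : List Char), ptl.length = ctl.length →
      ((ctl.map g = ptl) ↔ (∀ q ∈ ptl.zip ctl, g q.2 = q.1)) := by
  intro ptl
  induction ptl with
  | nil =>
    intro ctl h
    cases ctl <;> simp_all
  | cons p rest ih =>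
    intro ctl h
    cases ctl with
    | nil => simp at h
    | cons x xs =>
      simp only [List.map_cons, List.cons.injEq, List.zip_cons_cons, List.mem_cons]
      constructor
      · rintro ⟨h1, h2⟩ q hq
        rcases hq with rfl | hq
        · exact h1
        · exact ((ih xs (by simpa using h)).mp h2) q hq
      · intro hall
        exact ⟨hall _ (Or.inl rfl), (ih xs (by simpa using h)).mpr (fun q hq => hall q (Or.inr hq))⟩

theorem decryptTextA_map (msg K : List Char) :
    decryptTextA msg K = msg.map (fun c => fromBitsA (decryptA (toBitsA c) K)) := by
  simp only [decryptTextA, PySem.List.foldl_append_singleton_eq_map, List.nil_append,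
    List.map_map]
  rfl

-- the sieve computes the filter by the conjunction of all its constraints
theorem sieveB_eq_filter : ∀ (cs : List (Char × Char)) (cands : List (List Char)),
    sieveB cs cands = cands.filter (fun key => cs.all (fun q => decCharB q.2 key = q.1)) := by
  intro cs
  induction cs with
  | nil => intro cands; simp [sieveB]
  | cons q rest ih =>
    intro cands
    obtain ⟨p, c⟩ := q
    show (if cands.filter (fun key => decCharB c key = p) = [] then
            cands.filter (fun key => decCharB c key = p)
          else sieveB rest (cands.filter (fun key => decCharB c key = p))) = _
    have hsplit : (cands.filter (fun key => decCharB c key = p)).filter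
        (fun key => rest.all (fun q => decCharB q.2 key = q.1)) =
        cands.filter (fun key => ((p, c) :: rest).all (fun q => decCharB q.2 key = q.1)) := by
      rw [List.filter_filter]
      refine List.filter_congr (fun key _ => ?_)
      simp [List.all_cons, Bool.and_comm]
    split_ifs with hemp
    · rw [← hsplit, hemp]
      simp
    · rw [ih, hsplit]

-- ===== VERDICT (by name: the statement is the Claim_ definition above) =====
theorem dom_chars {pt ct : String} (hdom : Dom_CryptAnalysis pt ct) :
    ∀ c ∈ ct.toList, c.toNat < 256 := by
  intro c hc
  simp only [Dom_CryptAnalysis, pvDomStr, Bool.and_eq_true, List.all_eq_true] at hdom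
  have := hdom.2 c hc
  simp only [pvDomChar, Bool.or_eq_true, Bool.and_eq_true, decide_eq_true_eq,
    beq_iff_eq] at this
  omega

set_option maxRecDepth 4096 in
theorem CryptAnalysis_spec : Claim_equal_CryptAnalysis := by
  intro pt ct hdom
  unfold Spec_CryptAnalysis CryptAnalysis
  have hct := dom_chars hdom
  rw [prodA_eq, show (2:Nat) ^ 10 = 1024 by norm_num, PySem.List.foldl_append_ite,
    List.nil_append, List.filter_map, List.map_map]
  by_cases hlen : pt.toList.length = ct.toList.length
  · have hB : CryptAnalysis_alt pt ct =
        (sieveB (PySem.List.dedup (pt.toList.zip ct.toList))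
          ((List.range 1024).map (fun k => binW 10 k))).map String.mk := by
      unfold CryptAnalysis_alt
      rw [if_neg (fun h => h hlen)]
    rw [hB, sieveB_eq_filter, List.filter_map, List.map_map]
    congr 1
    refine List.filter_congr (fun k _ => ?_)
    have hKbin : IsBin (binW 10 k) := binW_bin 10 k
    have hmapeq : decryptTextA ct.toList (binW 10 k) =
        ct.toList.map (fun c => decCharB c (binW 10 k)) := by
      rw [decryptTextA_map]
      exact List.map_congr_left (fun c hc => decCharAB hKbin (hct c hc))
    simp only [Function.comp_apply]
    rw [hmapeq, Bool.eq_iff_iff, decide_eq_true_eq, List.all_eq_true,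
      map_eq_iff_zip _ _ _ hlen]
    simp only [decide_eq_true_eq]
    constructor
    · intro h q hq
      exact h q ((PySem.List.mem_dedup _ _).mp hq)
    · intro h q hq
      exact h q ((PySem.List.mem_dedup _ _).mpr hq)
  · have hB : CryptAnalysis_alt pt ct = [] := by
      unfold CryptAnalysis_alt
      rw [if_pos hlen]
    rw [hB]
    rw [List.filter_eq_nil_iff.mpr ?_, List.map_nil]
    intro k _
    simp only [Function.comp_apply, decide_eq_true_eq]
    intro h
    apply hlen
    rw [← h, decryptTextA_map, List.length_map]
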